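-- pv_equiv track=rewrite | github.com/UCSB-NLP-Chang/Diffusion-SpaceTime-Attn | layout_predictor/LayoutTransformer/loader/COCODataset.py | process_word
-- ===== SOURCE A (Python) =====
-- def process_word(sentence):
--     '''
--     PAD = 0, CLS = 1, SEP = 2, MASK = 3
--     Subj = 1, Rel = 2, Obj = 3
--     '''
--     segment_label = []
--     token_type = []
--     segment_idx = 1
--     for i in range(len(sentence)):
--         if sentence[i] > 0:
--             segment_label.append(segment_idx)
--             token_type.append(i % 4)
--             if sentence[i] == 2:
--                 segment_idx += 1
--         else:
--             token_type.append(0)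
--             segment_label.append(0)
--
--     return sentence, segment_label, token_type
-- ===== SOURCE B (Python) =====
-- def process_word(sentence):
--     # table-then-two-passes: exclusive prefix counts of SEP (=2), then two
--     # independent comprehensions for segment labels and token types
--     pref = []
--     c = 0
--     for v in sentence:
--         pref.append(c)
--         if v == 2:
--             c += 1
--     segment_label = [1 + p if v > 0 else 0 for v, p in zip(sentence, pref)]
--     token_type = [i % 4 if v > 0 else 0 for i, v in enumerate(sentence)]
--     return sentence, segment_label, token_type
-- ===== Notes on version B (the rewrite author's own statement) =====
-- stated objective: alternative
-- what changed: Replaces A's single interleaved loop (one mutable segment counter driving both output lists) with a prefix table of exclusive SEP(=2) counts followed by two independent comprehensions over zip/enumerate.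
import Mathlib
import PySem

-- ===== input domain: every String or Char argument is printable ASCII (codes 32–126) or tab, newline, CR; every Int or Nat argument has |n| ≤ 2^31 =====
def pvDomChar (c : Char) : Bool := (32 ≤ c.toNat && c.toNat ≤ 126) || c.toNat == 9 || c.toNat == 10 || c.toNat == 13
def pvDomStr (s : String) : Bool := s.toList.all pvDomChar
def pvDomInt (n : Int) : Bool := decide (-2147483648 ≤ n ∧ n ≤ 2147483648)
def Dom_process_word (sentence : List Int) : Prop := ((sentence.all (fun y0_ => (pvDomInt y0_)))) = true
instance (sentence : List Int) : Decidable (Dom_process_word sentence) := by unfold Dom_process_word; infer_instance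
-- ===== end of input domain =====

-- B replaces A's interleaved accumulator loop by a prefix table of exclusive SEP(=2)
-- counts and two independent map passes; same cost, different decomposition.

-- ===== PORT A =====
-- A's loop body: state = (segment_label, token_type, segment_idx)
def pwStepA (st : List Int × List Int × Int) (iv : Int × Int) : List Int × List Int × Int :=
  if iv.2 > 0 then
    (st.1 ++ [st.2.2], st.2.1 ++ [PySem.Int.mod iv.1 4],
     if iv.2 = 2 then st.2.2 + 1 else st.2.2)
  else
    (st.1 ++ [0], st.2.1 ++ [0], st.2.2)

def process_word (sentence : List Int) : List Int × List Int × List Int :=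
  let st := (PySem.List.enumerate sentence 0).foldl pwStepA ([], [], 1)
  (sentence, st.1, st.2.1)

-- ===== PORT B =====
-- B's prefix loop body: state = (pref, c)
def pwStepP (st : List Int × Int) (v : Int) : List Int × Int :=
  (st.1 ++ [st.2], if v = 2 then st.2 + 1 else st.2)

def pw_pref (sentence : List Int) : List Int :=
  (sentence.foldl pwStepP ([], 0)).1

def process_word_alt (sentence : List Int) : List Int × List Int × List Int :=
  let pref := pw_pref sentence
  let segment_label := (sentence.zip pref).map (fun vp => if vp.1 > 0 then 1 + vp.2 else 0)
  let token_type := (PySem.List.enumerate sentence 0).map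
    (fun iv => if iv.2 > 0 then PySem.Int.mod iv.1 4 else 0)
  (sentence, segment_label, token_type)

-- ===== PRECONDITION & SPEC =====
def Spec_process_word (sentence : List Int) (out : List Int × List Int × List Int) : Prop := out = process_word_alt sentence
instance (sentence : List Int) (out : List Int × List Int × List Int) : Decidable (Spec_process_word sentence out) := by unfold Spec_process_word; infer_instance

-- ===== CLAIM (what is proved, stated in full; the proofs are below) =====
def Claim_equal_process_word : Prop := ∀ (sentence : List Int), Dom_process_word sentence → Spec_process_word sentence (process_word sentence)

-- ===== LEMMAS AND PROOFS =====

-- the exclusive prefix-count list, structurally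
def prefList : List Int → Int → List Int
  | [], _ => []
  | v :: r, c => c :: prefList r (if v = 2 then c + 1 else c)

-- the final counter value
def cEnd : List Int → Int → Int
  | [], c => c
  | v :: r, c => cEnd r (if v = 2 then c + 1 else c)

theorem pref_fold_eq (l : List Int) : ∀ (pl : List Int) (c : Int),
    l.foldl pwStepP (pl, c) = (pl ++ prefList l c, cEnd l c) := by
  induction l with
  | nil => intro pl c; simp [prefList, cEnd]
  | cons v r ih =>
      intro pl c
      simp only [List.foldl_cons, pwStepP, prefList, cEnd, ih]
      simp

theorem loopA_eq (l : List Int) : ∀ (k : Int) (sl tl : List Int) (c : Int),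
    (PySem.List.enumerate l k).foldl pwStepA (sl, tl, 1 + c) =
      (sl ++ (l.zip (prefList l c)).map (fun vp => if vp.1 > 0 then 1 + vp.2 else 0),
       tl ++ (PySem.List.enumerate l k).map
         (fun iv => if iv.2 > 0 then PySem.Int.mod iv.1 4 else 0),
       1 + cEnd l c) := by
  induction l with
  | nil => intro k sl tl c; simp [PySem.List.enumerate_nil, prefList, cEnd]
  | cons v r ih =>
      intro k sl tl c
      rw [PySem.List.enumerate_cons]
      simp only [List.foldl_cons]
      by_cases hv : v > 0
      · have hstep : pwStepA (sl, tl, 1 + c) (k, v) =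
            (sl ++ [1 + c], tl ++ [PySem.Int.mod k 4], 1 + (if v = 2 then c + 1 else c)) := by
          simp only [pwStepA, hv, if_pos]
          by_cases h2 : v = 2
          · simp [h2]; ring_nf
          · simp [h2]
        rw [hstep, ih]
        simp [prefList, cEnd, hv, List.append_assoc]
      · have h2 : ¬ (v = 2) := by intro h; rw [h] at hv; exact hv (by norm_num)
        have hstep : pwStepA (sl, tl, 1 + c) (k, v) =
            (sl ++ [0], tl ++ [0], 1 + (if v = 2 then c + 1 else c)) := by
          simp [pwStepA, hv, h2]
        rw [hstep, ih]
        simp [prefList, cEnd, hv, h2, List.append_assoc]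

-- ===== VERDICT (by name: the statement is the Claim_ definition above) =====
theorem process_word_spec : Claim_equal_process_word := by
  intro sentence _
  unfold Spec_process_word process_word process_word_alt pw_pref
  have h := loopA_eq sentence 0 [] [] 0
  rw [show (1 : Int) + 0 = 1 from by norm_num] at h
  rw [h, pref_fold_eq]
  simp
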